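-- pv_equiv track=rewrite | github.com/AgilYathushan/SAPM-IMS-Software | services/api-gateway/main.py | find_target_service
-- ===== SOURCE A (Python) =====
-- from typing import Optional
--
-- SERVICE_MAPPINGS = {
--     "/api/v1/auth": "http://auth-service:5001",
--     "/api/v1/users": "http://user-service:5002",
--     "/api/v1/patients": "http://patient-service:5003",
--     "/api/v1/medical-staff": "http://medical-staff-service:5004",
--     "/api/v1/medical-images": "http://medical-image-service:5005",
--     "/api/v1/medical-tests": "http://medical-test-service:5009",
--     "/api/v1/diagnostic-reports": "http://diagnostic-report-service:5006",
--     "/api/v1/billing": "http://billing-service:5007",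
--     "/api/v1/workflow": "http://workflow-service:5008",
-- }
--
-- def find_target_service(path: str) -> Optional[tuple[str, str]]:
--     """
--     Find the target service URL for a given path.
--     Returns (base_url, full_path) or None if no match.
--     Services expect the full path including /api/v1 prefix.
--     """
--     # Normalize path - ensure it starts with /
--     if not path.startswith("/"):
--         path = "/" + path
--
--     # Sort by path length (longest first) to match more specific paths first
--     sorted_paths = sorted(SERVICE_MAPPINGS.keys(), key=len, reverse=True)
--
--     for service_path in sorted_paths:
--         if path.startswith(service_path):
--             base_url = SERVICE_MAPPINGS[service_path]
--             # Forward the full path to the service (services expect /api/v1 prefix)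
--             return (base_url, path)
--
--     return None
-- ===== SOURCE B (Python) =====
-- from typing import Optional
--
-- SERVICE_MAPPINGS = {
--     "/api/v1/auth": "http://auth-service:5001",
--     "/api/v1/users": "http://user-service:5002",
--     "/api/v1/patients": "http://patient-service:5003",
--     "/api/v1/medical-staff": "http://medical-staff-service:5004",
--     "/api/v1/medical-images": "http://medical-image-service:5005",
--     "/api/v1/medical-tests": "http://medical-test-service:5009",
--     "/api/v1/diagnostic-reports": "http://diagnostic-report-service:5006",
--     "/api/v1/billing": "http://billing-service:5007",
--     "/api/v1/workflow": "http://workflow-service:5008",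
-- }
--
-- def find_target_service(path: str):
--     if not path.startswith("/"):
--         path = "/" + path
--     matches = [k for k in SERVICE_MAPPINGS if path.startswith(k)]
--     if matches:
--         best = max(matches, key=len)
--         return (SERVICE_MAPPINGS[best], path)
--     return None
-- ===== Notes on version B (the rewrite author's own statement) =====
-- stated objective: simpler
-- what changed: A sorts the service prefixes by length (longest first) and returns the first prefix match in a scan; B drops the sort entirely, filters the keys that are prefixes of the path and picks the longest match with max(key=len).
import Mathlib
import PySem

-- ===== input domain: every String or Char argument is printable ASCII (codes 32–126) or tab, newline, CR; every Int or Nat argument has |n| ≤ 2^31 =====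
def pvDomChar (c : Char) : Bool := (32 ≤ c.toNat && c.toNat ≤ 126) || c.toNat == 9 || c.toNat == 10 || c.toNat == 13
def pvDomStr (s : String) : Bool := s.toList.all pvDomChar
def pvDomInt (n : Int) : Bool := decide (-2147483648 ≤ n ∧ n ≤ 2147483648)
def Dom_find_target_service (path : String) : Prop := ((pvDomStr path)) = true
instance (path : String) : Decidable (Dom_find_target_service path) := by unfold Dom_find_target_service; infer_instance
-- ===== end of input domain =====

-- B replaces A's sort-then-first-match scan by a filter-then-max(len) selection; objective: simpler.


-- ===== PORT A =====
def SERVICE_MAPPINGS : PySem.Dict String String := PySem.Dict.ofList [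
  ("/api/v1/auth", "http://auth-service:5001"),
  ("/api/v1/users", "http://user-service:5002"),
  ("/api/v1/patients", "http://patient-service:5003"),
  ("/api/v1/medical-staff", "http://medical-staff-service:5004"),
  ("/api/v1/medical-images", "http://medical-image-service:5005"),
  ("/api/v1/medical-tests", "http://medical-test-service:5009"),
  ("/api/v1/diagnostic-reports", "http://diagnostic-report-service:5006"),
  ("/api/v1/billing", "http://billing-service:5007"),
  ("/api/v1/workflow", "http://workflow-service:5008")]

-- the 'for service_path in sorted_paths' loop of A
def findLoop (path : String) : List String → Option (String × String)
  | [] => none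
  | k :: rest =>
      if PySem.Str.startswith path k then
        some (SERVICE_MAPPINGS.getD k "", path)
      else findLoop path rest

def find_target_service (path : String) : Option (String × String) :=
  let path := if PySem.Str.startswith path "/" then path else "/" ++ path
  let sorted_paths := PySem.List.sorted SERVICE_MAPPINGS.keys (fun k => PySem.Str.len k) true
  findLoop path sorted_paths

-- ===== PORT B =====
def find_target_service_alt (path : String) : Option (String × String) :=
  let path := if PySem.Str.startswith path "/" then path else "/" ++ path
  let ms := SERVICE_MAPPINGS.keys.filter (fun k => PySem.Str.startswith path k)
  match PySem.List.max? ms (fun k => PySem.Str.len k) with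
  | some best => some (SERVICE_MAPPINGS.getD best "", path)
  | none => none

-- ===== PRECONDITION & SPEC =====
def Spec_find_target_service (path : String) (out : Option (String × String)) : Prop := out = find_target_service_alt path
instance (path : String) (out : Option (String × String)) : Decidable (Spec_find_target_service path out) := by unfold Spec_find_target_service; infer_instance

-- ===== CLAIM (what is proved, stated in full; the proofs are below) =====
def Claim_equal_find_target_service : Prop := ∀ (path : String), Dom_find_target_service path → Spec_find_target_service path (find_target_service path)

-- ===== LEMMAS AND PROOFS =====
set_option maxHeartbeats 4000000 in
theorem core_eq (q : String) :
    findLoop q (PySem.List.sorted SERVICE_MAPPINGS.keys (fun k => PySem.Str.len k) true) =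
    (match PySem.List.max? (SERVICE_MAPPINGS.keys.filter (fun k => PySem.Str.startswith q k))
        (fun k => PySem.Str.len k) with
     | some best => some (SERVICE_MAPPINGS.getD best "", q)
     | none => none) := by
  have hs : PySem.List.sorted SERVICE_MAPPINGS.keys (fun k => PySem.Str.len k) true =
      ["/api/v1/diagnostic-reports", "/api/v1/medical-images", "/api/v1/medical-staff",
       "/api/v1/medical-tests", "/api/v1/patients", "/api/v1/workflow", "/api/v1/billing",
       "/api/v1/users", "/api/v1/auth"] := by decide
  have hk : SERVICE_MAPPINGS.keys =
      ["/api/v1/auth", "/api/v1/users", "/api/v1/patients", "/api/v1/medical-staff",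
       "/api/v1/medical-images", "/api/v1/medical-tests", "/api/v1/diagnostic-reports",
       "/api/v1/billing", "/api/v1/workflow"] := by decide
  rw [hs, hk]
  cases h1 : PySem.Str.startswith q "/api/v1/auth" <;>
  cases h2 : PySem.Str.startswith q "/api/v1/users" <;>
  cases h3 : PySem.Str.startswith q "/api/v1/patients" <;>
  cases h4 : PySem.Str.startswith q "/api/v1/medical-staff" <;>
  cases h5 : PySem.Str.startswith q "/api/v1/medical-images" <;>
  cases h6 : PySem.Str.startswith q "/api/v1/medical-tests" <;>
  cases h7 : PySem.Str.startswith q "/api/v1/diagnostic-reports" <;>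
  cases h8 : PySem.Str.startswith q "/api/v1/billing" <;>
  cases h9 : PySem.Str.startswith q "/api/v1/workflow" <;>
  simp only [findLoop, List.filter_cons, List.filter_nil, h1, h2, h3, h4, h5, h6, h7, h8, h9,
    reduceIte] <;> rfl

-- ===== VERDICT (by name: the statement is the Claim_ definition above) =====
theorem find_target_service_spec : Claim_equal_find_target_service := by
  intro path _
  unfold Spec_find_target_service find_target_service find_target_service_alt
  exact core_eq _
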